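-- pv_equiv track=rewrite | github.com/tbarbito/atudic-supreme | app/services/workspace/parser_source.py | _find_func_body_end
-- ===== SOURCE A (Python) =====
-- import bisect
--
-- def _build_line_offsets(content: str) -> list[int]:
--     """Build array of start-of-line offsets. O(n) single pass, zero copies."""
--     offsets = [0]
--     idx = content.find('\n')
--     while idx != -1:
--         offsets.append(idx + 1)
--         idx = content.find('\n', idx + 1)
--     return offsets
--
-- def _classify_lines(content: str, offsets: list[int]) -> list[int]:
--     """Classify each line as CODE=0, COMMENT=1, BLANK=2.
--
--     Single forward pass. Uses strip() on each line (small, bounded string).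
--     """
--     num_lines = len(offsets)
--     types = [0] * num_lines
--     in_block = False
--
--     for i in range(num_lines):
--         start = offsets[i]
--         end = offsets[i + 1] - 1 if i + 1 < num_lines else len(content)
--         s = content[start:end].strip()
--
--         if not s:
--             types[i] = 2  # blank
--             continue
--
--         if in_block:
--             types[i] = 1  # comment
--             if '*/' in s:
--                 in_block = False
--             continue
--
--         if s[:2] == '//':
--             types[i] = 1
--         elif s[:2] == '/*':
--             types[i] = 1
--             if '*/' not in s[2:]:
--                 in_block = True
--         elif s[0] == '*' or s[:2] == '*/':
--             types[i] = 1
--         # else: types[i] = 0 (code, already default)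
--
--     return types
--
-- def _find_func_body_end(content: str, next_match_start: int, current_start: int = 0) -> int:
--     """Find where current function body ends (before next function's header).
--
--     Compatibility wrapper for ingestor.py — uses line offset table internally.
--     """
--     offsets = _build_line_offsets(content)
--     line_types = _classify_lines(content, offsets)
--     next_line = bisect.bisect_right(offsets, next_match_start) - 1
--     cur_line = bisect.bisect_right(offsets, current_start) - 1
--
--     # Walk backward from next function's declaration
--     header_line = next_line
--     for j in range(next_line - 1, cur_line, -1):
--         if line_types[j] == 0:  # code — stop
--             break
--         header_line = j
--
--     return offsets[header_line]
-- ===== SOURCE B (Python) =====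
-- def _find_func_body_end(content: str, next_match_start: int, current_start: int = 0) -> int:
--     """Single forward pass over the lines: keep a running line-start offset and the
--     C-block-comment flag, remember where the lines holding current_start and
--     next_match_start begin, and the offset just after the most recent CODE line
--     strictly between them.  No offset table, no bisect, no backward walk."""
--     in_block = False
--     start = 0
--     cur_i = -1          # index of the line containing current_start (-1: before line 0)
--     next_i = -1         # index of the line containing next_match_start
--     next_off = 0        # start offset of that line
--     cur_after = 0       # start offset of the line following cur_i
--     after_code = None   # offset of the line following the last code line in the open range
--     lines = content.split('\n')
--     for i, line in enumerate(lines):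
--         nxt = start + len(line) + 1          # start of the following line
--         s = line.strip()
--         if not s:
--             code = False
--         elif in_block:
--             if '*/' in s:
--                 in_block = False
--             code = False
--         elif s.startswith('//'):
--             code = False
--         elif s.startswith('/*'):
--             if '*/' not in s[2:]:
--                 in_block = True
--             code = False
--         elif s[0] == '*':
--             code = False
--         else:
--             code = True
--         if start <= current_start:
--             cur_i, cur_after = i, nxt
--         if start <= next_match_start:
--             next_i, next_off = i, start
--         if code and start > current_start and i + 1 < len(lines) and nxt <= next_match_start:
--             after_code = nxt
--         start = nxt
--     if next_i <= cur_i: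
--         return next_off
--     if after_code is not None:
--         return after_code
--     return cur_after
-- ===== Notes on version B (the rewrite author's own statement) =====
-- stated objective: alternative
-- what changed: Replaces A's four phases (offset table build, per-line type array, two bisect calls, backward walk) by a single forward pass over the split lines that keeps a running line-start offset, the block-comment flag, and the 'offset after the last code line' for the open range, so the types array, bisect and the backward walk disappear.
-- intended difference: When next_match_start < 0 and content contains a newline, A's bisect gives line -1 and Python negative-index wraparound makes it return the LAST line's start offset; B returns 0, the start of the line containing any offset before the file, which is the intended value. — e.g. on _find_func_body_end("a\nb", -1, 0): A returns 2, B returns 0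
import Mathlib
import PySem

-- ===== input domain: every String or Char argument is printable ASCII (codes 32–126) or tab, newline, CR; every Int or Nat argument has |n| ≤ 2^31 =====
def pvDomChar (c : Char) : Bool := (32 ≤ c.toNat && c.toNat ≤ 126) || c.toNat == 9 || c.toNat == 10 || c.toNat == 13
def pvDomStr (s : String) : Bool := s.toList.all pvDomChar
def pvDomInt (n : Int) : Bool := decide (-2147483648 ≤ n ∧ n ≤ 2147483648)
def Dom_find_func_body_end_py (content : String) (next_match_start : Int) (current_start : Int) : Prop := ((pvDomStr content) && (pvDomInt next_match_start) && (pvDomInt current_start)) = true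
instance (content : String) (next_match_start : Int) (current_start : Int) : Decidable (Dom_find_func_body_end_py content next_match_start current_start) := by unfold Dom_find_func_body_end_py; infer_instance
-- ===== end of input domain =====

-- B re-implements the lookup as ONE forward pass over the split lines (no offset
-- table, no types array, no bisect, no backward walk); same return value except on
-- the D_ corner below, where A's negative-index wraparound returns the last line's
-- start and B returns 0.  Header line: see claim.json.

-- ===== PORT A =====

-- while idx != -1: offsets.append(idx+1); idx = content.find('\n', idx+1)
-- (fuel only makes the loop total; content.length+1 always suffices, proved below)
def pvBuildOffsetsGo (content : List Char) (fuel : Nat) (offsets : List Int) (idx : Int) : List Int :=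
  match fuel with
  | 0 => offsets
  | fuel + 1 =>
    if idx = -1 then offsets
    else pvBuildOffsetsGo content fuel (offsets ++ [idx + 1]) (PySem.Chars.findFrom content ['\n'] (idx + 1) none)

def pvBuildLineOffsets (content : List Char) : List Int :=
  pvBuildOffsetsGo content (content.length + 1) [0] (PySem.Chars.find content ['\n'])

-- body of the `for i in range(num_lines)` loop of _classify_lines; state = (types, in_block)
def pvClassifyStep (content : List Char) (offsets : List Int) (numLines : Int)
    (st : List Int × Bool) (i : Int) : List Int × Bool :=
  let types := st.1
  let in_block := st.2
  let start := PySem.List.pyGetD offsets i 0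
  let stop := if i + 1 < numLines then PySem.List.pyGetD offsets (i + 1) 0 - 1 else PySem.List.len content
  let s := PySem.Chars.strip (PySem.List.slice content (some start) (some stop))
  if s.isEmpty then
    (types.set i.toNat 2, in_block)
  else if in_block then
    (types.set i.toNat 1, if PySem.Chars.isIn ['*', '/'] s then false else in_block)
  else if PySem.List.slice s none (some 2) = ['/', '/'] then
    (types.set i.toNat 1, in_block)
  else if PySem.List.slice s none (some 2) = ['/', '*'] then
    (types.set i.toNat 1, if ¬ (PySem.Chars.isIn ['*', '/'] (PySem.List.slice s (some 2) none)) then true else in_block)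
  else if PySem.List.pyGetD s 0 ' ' = '*' ∨ PySem.List.slice s none (some 2) = ['*', '/'] then
    (types.set i.toNat 1, in_block)
  else
    (types, in_block)

def pvClassifyLines (content : List Char) (offsets : List Int) : List Int :=
  let numLines := PySem.List.len offsets
  ((PySem.List.pyRange 0 numLines 1).foldl (pvClassifyStep content offsets numLines)
    (List.replicate numLines.toNat 0, false)).1

-- for j in range(next_line-1, cur_line, -1): if types[j]==0: break; header=j
def pvWalkBack (line_types : List Int) (js : List Int) (header : Int) : Int :=
  match js with
  | [] => header
  | j :: rest => if PySem.List.pyGetD line_types j 0 = 0 then header else pvWalkBack line_types rest j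

def find_func_body_end_py (content : String) (next_match_start : Int) (current_start : Int) : Int :=
  let cs := content.toList
  let offsets := pvBuildLineOffsets cs
  let line_types := pvClassifyLines cs offsets
  let next_line : Int := (PySem.List.bisectRight offsets next_match_start : Int) - 1
  let cur_line : Int := (PySem.List.bisectRight offsets current_start : Int) - 1
  let header_line := pvWalkBack line_types (PySem.List.pyRange (next_line - 1) cur_line (-1)) next_line
  PySem.List.pyGetD offsets header_line 0

-- ===== PORT B =====

structure PvBState where
  in_block : Bool
  start : Int
  cur_i : Int
  next_i : Int
  next_off : Int
  cur_after : Int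
  after_code : Option Int
deriving Repr, DecidableEq

def pvAltStep (next_match_start current_start numLines : Int) (st : PvBState)
    (p : Int × List Char) : PvBState :=
  let i := p.1
  let line := p.2
  let nxt := st.start + line.length + 1
  let s := PySem.Chars.strip line
  let ib_code : Bool × Bool :=   -- (new in_block, code)
    if s.isEmpty then (st.in_block, false)
    else if st.in_block then
      ((if PySem.Chars.isIn ['*', '/'] s then false else st.in_block), false)
    else if PySem.Chars.startswith s ['/', '/'] then (st.in_block, false)
    else if PySem.Chars.startswith s ['/', '*'] then
      ((if ¬ (PySem.Chars.isIn ['*', '/'] (PySem.List.slice s (some 2) none)) then true else st.in_block), false)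
    else if PySem.List.pyGetD s 0 ' ' = '*' then (st.in_block, false)
    else (st.in_block, true)
  let cur := if st.start ≤ current_start then (i, nxt) else (st.cur_i, st.cur_after)
  let nextp := if st.start ≤ next_match_start then (i, st.start) else (st.next_i, st.next_off)
  let after_code :=
    if ib_code.2 ∧ st.start > current_start ∧ i + 1 < numLines ∧ nxt ≤ next_match_start then
      some nxt
    else st.after_code
  ⟨ib_code.1, nxt, cur.1, nextp.1, nextp.2, cur.2, after_code⟩

def find_func_body_end_py_alt (content : String) (next_match_start : Int) (current_start : Int) : Int :=
  let lines := content.toList.splitOn '\n'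
  let st := (PySem.List.enumerate lines).foldl
    (pvAltStep next_match_start current_start (PySem.List.len lines))
    ⟨false, 0, -1, -1, 0, 0, none⟩
  if st.next_i ≤ st.cur_i then st.next_off
  else
    match st.after_code with
    | some v => v
    | none => st.cur_after

-- ===== PRECONDITION & SPEC =====

-- When next_match_start < 0 and content contains a newline, A's bisect yields line
-- -1 and Python's negative-index wraparound returns the LAST line's start offset —
-- an accident of the implementation; B returns 0, the start of the line containing
-- every offset before the file, which is the intended reading.
def D_find_func_body_end_py (content : String) (next_match_start : Int) (current_start : Int) : Prop :=
  next_match_start < 0 ∧ PySem.Str.isIn "\n" content = true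

instance (content : String) (next_match_start : Int) (current_start : Int) : Decidable (D_find_func_body_end_py content next_match_start current_start) := by
  unfold D_find_func_body_end_py; infer_instance

def Spec_find_func_body_end_py (content : String) (next_match_start : Int) (current_start : Int) (out : Int) : Prop := ¬ D_find_func_body_end_py content next_match_start current_start → out = find_func_body_end_py_alt content next_match_start current_start
instance (content : String) (next_match_start : Int) (current_start : Int) (out : Int) : Decidable (Spec_find_func_body_end_py content next_match_start current_start out) := by unfold Spec_find_func_body_end_py; infer_instance

def pvDiffWitness_find_func_body_end_py : String × Int × Int := ("a\nb", -1, 0)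
def pvDiffWitnessOut_find_func_body_end_py : Int × Int := (2, 0)

-- ===== CLAIM (what is proved, stated in full; the proofs are below) =====
def Claim_unchanged_find_func_body_end_py : Prop := ∀ (content : String) (next_match_start : Int) (current_start : Int), Dom_find_func_body_end_py content next_match_start current_start → Spec_find_func_body_end_py content next_match_start current_start (find_func_body_end_py content next_match_start current_start)
def Claim_changed_find_func_body_end_py : Prop := Dom_find_func_body_end_py (pvDiffWitness_find_func_body_end_py.1) (pvDiffWitness_find_func_body_end_py.2.1) (pvDiffWitness_find_func_body_end_py.2.2) ∧ D_find_func_body_end_py (pvDiffWitness_find_func_body_end_py.1) (pvDiffWitness_find_func_body_end_py.2.1) (pvDiffWitness_find_func_body_end_py.2.2) ∧ find_func_body_end_py (pvDiffWitness_find_func_body_end_py.1) (pvDiffWitness_find_func_body_end_py.2.1) (pvDiffWitness_find_func_body_end_py.2.2) = pvDiffWitnessOut_find_func_body_end_py.1 ∧ find_func_body_end_py_alt (pvDiffWitness_find_func_body_end_py.1) (pvDiffWitness_find_func_body_end_py.2.1) (pvDiffWitness_find_func_body_end_py.2.2) = pvDiffWitnessOut_find_func_body_end_py.2 ∧ pvDiffWitnessOut_find_func_body_end_py.1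 ≠ pvDiffWitnessOut_find_func_body_end_py.2
def Claim_exact_find_func_body_end_py : Prop := ∀ (content : String) (next_match_start : Int) (current_start : Int), Dom_find_func_body_end_py content next_match_start current_start → D_find_func_body_end_py content next_match_start current_start → find_func_body_end_py content next_match_start current_start ≠ find_func_body_end_py_alt content next_match_start current_start

-- ===== LEMMAS AND PROOFS =====

-- ---- reference decomposition of the content into lines ----

def pvStartsAt (ls : List (List Char)) (t : Nat) : Int :=
  ((ls.take t).map (fun l => (l.length : Int) + 1)).sum

def pvStartsFrom : List (List Char) → Int → List Int
  | [], _ => []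
  | l :: ll, p => p :: pvStartsFrom ll (p + l.length + 1)

def pvNlOffs : List Char → Int → List Int
  | [], _ => []
  | c :: rest, p => if c = '\n' then (p + 1) :: pvNlOffs rest (p + 1) else pvNlOffs rest (p + 1)

def pvClassifyOne (b : Bool) (l : List Char) : Int × Bool :=
  let s := PySem.Chars.strip l
  if s.isEmpty then (2, b)
  else if b then (1, if PySem.Chars.isIn ['*', '/'] s then false else b)
  else if PySem.Chars.startswith s ['/', '/'] then (1, b)
  else if PySem.Chars.startswith s ['/', '*'] then
    (1, if ¬ (PySem.Chars.isIn ['*', '/'] (PySem.List.slice s (some 2) none)) then true else b)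
  else if PySem.List.pyGetD s 0 ' ' = '*' then (1, b)
  else (0, b)

def pvCB (ls : List (List Char)) : Nat → Bool
  | 0 => false
  | t + 1 => (pvClassifyOne (pvCB ls t) (ls.getD t [])).2

def pvTy (ls : List (List Char)) (t : Nat) : Int :=
  (pvClassifyOne (pvCB ls t) (ls.getD t [])).1

def pvLastB (ls : List (List Char)) (x : Int) : Nat → Int
  | 0 => -1
  | t + 1 => if pvStartsAt ls t ≤ x then ((t : Nat) : Int) else pvLastB ls x t

def pvNextOff (ls : List (List Char)) (x : Int) : Nat → Int
  | 0 => 0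
  | t + 1 => if pvStartsAt ls t ≤ x then pvStartsAt ls t else pvNextOff ls x t

def pvCurAfter (ls : List (List Char)) (y : Int) : Nat → Int
  | 0 => 0
  | t + 1 => if pvStartsAt ls t ≤ y then pvStartsAt ls (t + 1) else pvCurAfter ls y t

def pvLastCode (ls : List (List Char)) (x y : Int) : Nat → Option Nat
  | 0 => none
  | t + 1 =>
    if pvTy ls t = 0 ∧ y < pvStartsAt ls t ∧ ((t : Int) + 1) < (ls.length : Int) ∧ pvStartsAt ls (t + 1) ≤ x
    then some t else pvLastCode ls x y t

def pvLCI (ls : List (List Char)) (c : Int) : Nat → Option Nat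
  | 0 => if (0 : Int) ≤ c then none else if pvTy ls 0 = 0 then some 0 else none
  | e + 1 => if ((e : Int) + 1) ≤ c then none else if pvTy ls (e + 1) = 0 then some (e + 1) else pvLCI ls c e

theorem pv_startsAt_zero (ls : List (List Char)) : pvStartsAt ls 0 = 0 := rfl

theorem pv_startsAt_succ (ls : List (List Char)) (t : Nat) (ht : t < ls.length) :
    pvStartsAt ls (t + 1) = pvStartsAt ls t + (ls.getD t []).length + 1 := by
  have hta : ls.take (t + 1) = ls.take t ++ [ls[t]] := by
    rw [List.take_add_one, List.getElem?_eq_getElem ht]; rfl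
  unfold pvStartsAt
  rw [hta, List.map_append, List.sum_append, List.getD_eq_getElem ls [] ht]
  simp only [List.map_cons, List.map_nil, List.sum_cons, List.sum_nil, add_zero]
  ring

theorem pv_startsAt_ge (ls : List (List Char)) (t : Nat) (h : ls.length ≤ t) :
    pvStartsAt ls t = pvStartsAt ls ls.length := by
  unfold pvStartsAt
  rw [List.take_of_length_le h, List.take_length]

theorem pv_startsAt_nonneg (ls : List (List Char)) (t : Nat) : 0 ≤ pvStartsAt ls t := by
  induction t with
  | zero => simp [pv_startsAt_zero]
  | succ u ih =>
    rcases Nat.lt_or_ge u ls.length with h | h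
    · rw [pv_startsAt_succ ls u h]; positivity
    · rw [pv_startsAt_ge ls (u+1) (by omega), ← pv_startsAt_ge ls u h]; exact ih

theorem pv_startsAt_mono (ls : List (List Char)) (t u : Nat) (htu : t < u) (hu : u ≤ ls.length) :
    pvStartsAt ls t < pvStartsAt ls u := by
  induction u with
  | zero => omega
  | succ v ih =>
    have hv : v < ls.length := by omega
    rw [pv_startsAt_succ ls v hv]
    have hnn : (0:Int) ≤ ((ls.getD v []).length : Int) := by positivity
    rcases Nat.lt_or_ge t v with h | h
    · have := ih (by omega) (by omega); omega
    · have : t = v := by omega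
      subst this; omega

theorem pv_startsFrom_length (ls : List (List Char)) (p : Int) :
    (pvStartsFrom ls p).length = ls.length := by
  induction ls generalizing p with
  | nil => rfl
  | cons l ll ih => simp [pvStartsFrom, ih]

theorem pv_startsFrom_getElem? (ls : List (List Char)) (p : Int) (t : Nat) (ht : t < ls.length) :
    (pvStartsFrom ls p)[t]? = some (p + pvStartsAt ls t) := by
  induction ls generalizing p t with
  | nil => simp at ht
  | cons l ll ih =>
    cases t with
    | zero => simp [pvStartsFrom, pv_startsAt_zero]
    | succ u =>
      have hu : u < ll.length := by simpa using ht
      simp only [pvStartsFrom, List.getElem?_cons_succ]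
      rw [ih _ u hu]
      have : pvStartsAt (l :: ll) (u + 1) = (l.length : Int) + 1 + pvStartsAt ll u := by
        unfold pvStartsAt
        simp [List.take_cons]
      rw [this]
      congr 1
      ring

-- ---- main characterization lemmas ----

-- ---- small supporting lemmas ----

theorem pv_lastB_lb (ls : List (List Char)) (x : Int) (t : Nat) : -1 ≤ pvLastB ls x t := by
  induction t with
  | zero => simp [pvLastB]
  | succ u ih => unfold pvLastB; split <;> omega

theorem pv_lastB_ub (ls : List (List Char)) (x : Int) (t : Nat) : pvLastB ls x t < (t : Int) := by
  induction t with
  | zero => simp [pvLastB]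
  | succ u ih => unfold pvLastB; split <;> [omega; (push_cast; omega)]

theorem pv_lastB_neg (ls : List (List Char)) (x : Int) (hx : x < 0) (t : Nat) :
    pvLastB ls x t = -1 := by
  induction t with
  | zero => rfl
  | succ u ih =>
    unfold pvLastB
    rw [if_neg (by have := pv_startsAt_nonneg ls u; omega)]
    exact ih

theorem pv_lastB_le_iff (ls : List (List Char)) (x : Int) (t : Nat) (ht : t ≤ ls.length)
    (j : Nat) (hj : j < t) : (pvStartsAt ls j ≤ x ↔ (j : Int) ≤ pvLastB ls x t) := by
  induction t with
  | zero => omega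
  | succ u ih =>
    unfold pvLastB
    split
    · rename_i hle
      constructor
      · intro _; exact_mod_cast Nat.cast_le.mpr (by omega)
      · intro _
        rcases Nat.lt_or_ge j u with h | h
        · exact le_trans (le_of_lt (pv_startsAt_mono ls j u h (by omega))) hle
        · have : j = u := by omega
          subst this; exact hle
    · rename_i hgt
      rcases Nat.lt_or_ge j u with h | h
      · exact ih (by omega) h
      · have hju : j = u := by omega
        subst hju
        constructor
        · intro h'; exact absurd h' hgt
        · intro h'
          have := pv_lastB_ub ls x j
          omega

theorem pv_nextOff_eq (ls : List (List Char)) (x : Int) (t : Nat) :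
    pvNextOff ls x t = if pvLastB ls x t = -1 then 0 else pvStartsAt ls (pvLastB ls x t).toNat := by
  induction t with
  | zero => simp [pvNextOff, pvLastB]
  | succ u ih =>
    unfold pvNextOff pvLastB
    split
    · rename_i h
      rw [if_neg (by omega)]
      simp
    · exact ih

theorem pv_curAfter_eq (ls : List (List Char)) (y : Int) (t : Nat) :
    pvCurAfter ls y t = if pvLastB ls y t = -1 then 0 else pvStartsAt ls ((pvLastB ls y t).toNat + 1) := by
  induction t with
  | zero => simp [pvCurAfter, pvLastB]
  | succ u ih =>
    unfold pvCurAfter pvLastB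
    split
    · rename_i h
      rw [if_neg (by omega)]
      simp
    · exact ih

theorem pv_lastCode_none_of_empty (ls : List (List Char)) (x y : Int) (t : Nat)
    (h : pvLastB ls x ls.length ≤ pvLastB ls y ls.length + 1) (ht : t ≤ ls.length) :
    pvLastCode ls x y t = none := by
  induction t with
  | zero => rfl
  | succ u ih =>
    unfold pvLastCode
    rw [if_neg]
    · exact ih (by omega)
    · rintro ⟨-, hy, hn, hx⟩
      have hun : u < ls.length := by omega
      have hun1 : u + 1 < ls.length := by exact_mod_cast hn
      have h1 : ¬ ((u : Int) ≤ pvLastB ls y ls.length) := by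
        rw [← pv_lastB_le_iff ls y ls.length le_rfl u hun]; omega
      have h2 := (pv_lastB_le_iff ls x ls.length le_rfl (u + 1) hun1).1 hx
      push_cast at h2
      omega

theorem pv_pyGetD_offsets (ls : List (List Char)) (t : Nat) (ht : t < ls.length) :
    PySem.List.pyGetD (pvStartsFrom ls 0) ((t : Nat) : Int) 0 = pvStartsAt ls t := by
  unfold PySem.List.pyGetD
  rw [PySem.List.pyGet?_natCast, pv_startsFrom_getElem? ls 0 t ht]
  simp

theorem pv_pyGetD_neg_one_offsets (ls : List (List Char)) (h : ls ≠ []) :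
    PySem.List.pyGetD (pvStartsFrom ls 0) (-1) 0 = pvStartsAt ls (ls.length - 1) := by
  unfold PySem.List.pyGetD
  rw [PySem.List.pyGet?_neg_one]
  have hl : (pvStartsFrom ls 0).length = ls.length := pv_startsFrom_length ls 0
  have hne : ls.length ≠ 0 := by have := List.length_pos_iff.mpr h; omega
  rw [List.getLast?_eq_getElem?, hl, pv_startsFrom_getElem? ls 0 (ls.length - 1) (by omega)]
  simp

theorem pv_pyRange_neg_empty (a b : Int) (h : a ≤ b) : PySem.List.pyRange a b (-1) = [] := by
  unfold PySem.List.pyRange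
  norm_num
  omega

theorem pv_pyRange_neg_cons (a b : Int) (h : b < a) :
    PySem.List.pyRange a b (-1) = a :: PySem.List.pyRange (a - 1) b (-1) := by
  unfold PySem.List.pyRange
  norm_num [h]
  rw [show ((a - b : Int)).toNat = (a - 1 - b).toNat + 1 by omega, List.range_succ_eq_map]
  simp
  by_cases h2 : b < a - 1
  · rw [if_pos h2]
    apply List.map_congr_left
    intro k _
    simp [Function.comp, Nat.succ_eq_add_one]
    push_cast
    ring
  · rw [if_neg h2]
    have h3 : (a - 1 - b).toNat = 0 := by omega
    simp [h3]

theorem pv_splitOn_ne_nil (cs : List Char) : cs.splitOn '\n' ≠ [] := by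
  simp [List.splitOn]; exact List.splitOnP_ne_nil _ _

theorem pv_splitOn_nl (rest : List Char) : ('\n' :: rest).splitOn '\n' = [] :: rest.splitOn '\n' := by
  simp [List.splitOn, List.splitOnP_cons]

theorem pv_splitOn_ne (c : Char) (h : ¬ c = '\n') (rest : List Char) :
    (c :: rest).splitOn '\n' = (c :: (rest.splitOn '\n').headI) :: (rest.splitOn '\n').tail := by
  have hne := List.splitOnP_ne_nil (fun a => a == '\n') rest
  simp [List.splitOn, List.splitOnP_cons, h]
  cases h2 : rest.splitOnP (fun a => a == '\n') with
  | nil => simp [h2] at hne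
  | cons a l => simp [List.modifyHead]

theorem pv_splitOn_singleton (cs : List Char) (h : '\n' ∉ cs) : cs.splitOn '\n' = [cs] := by
  induction cs with
  | nil => rfl
  | cons c rest ih =>
    have hc : ¬ c = '\n' := fun hh => h (by simp [hh])
    have hrest : '\n' ∉ rest := fun hh => h (by simp [hh])
    rw [pv_splitOn_ne c hc rest, ih hrest]
    rfl

theorem pv_mem_iff_two_le (cs : List Char) :
    '\n' ∈ cs ↔ 2 ≤ (cs.splitOn '\n').length := by
  induction cs with
  | nil => simp [List.splitOn]
  | cons c rest ih =>
    by_cases hc : c = '\n'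
    · subst hc
      rw [pv_splitOn_nl rest]
      have := List.length_pos_iff.mpr (pv_splitOn_ne_nil rest)
      simp
      omega
    · rw [pv_splitOn_ne c hc rest]
      have hne := pv_splitOn_ne_nil rest
      cases h2 : rest.splitOn '\n' with
      | nil => exact absurd h2 hne
      | cons a l =>
        rw [h2] at ih
        simp only [List.mem_cons, List.length_cons, List.tail_cons] at ih ⊢
        constructor
        · rintro (h | h)
          · exact absurd h.symm hc
          · have := ih.1 h; omega
        · intro h
          exact Or.inr (ih.2 (by omega))

theorem pv_bridgeQ (ls : List (List Char)) (x y : Int) (j : Nat) (hj : j < ls.length) :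
    ((pvTy ls j = 0 ∧ y < pvStartsAt ls j ∧ ((j : Int) + 1) < (ls.length : Int) ∧ pvStartsAt ls (j + 1) ≤ x)
      ↔ (pvLastB ls y ls.length < (j : Int) ∧ (j : Int) ≤ pvLastB ls x ls.length - 1 ∧ pvTy ls j = 0)) := by
  constructor
  · rintro ⟨ht, hy, hn, hx⟩
    have hj1 : j + 1 < ls.length := by exact_mod_cast hn
    have h2 := (pv_lastB_le_iff ls x ls.length le_rfl (j + 1) hj1).1 hx
    push_cast at h2
    have h3 : ¬ ((j : Int) ≤ pvLastB ls y ls.length) := by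
      rw [← pv_lastB_le_iff ls y ls.length le_rfl j hj]; omega
    exact ⟨by omega, by omega, ht⟩
  · rintro ⟨hcur, hnext, ht⟩
    have hnub := pv_lastB_ub ls x ls.length
    have hj1 : j + 1 < ls.length := by
      have : ((j : Int) + 1) < (ls.length : Int) := by omega
      exact_mod_cast this
    have hy : ¬ (pvStartsAt ls j ≤ y) := by
      rw [pv_lastB_le_iff ls y ls.length le_rfl j hj]; omega
    have hx : pvStartsAt ls (j + 1) ≤ x := by
      rw [pv_lastB_le_iff ls x ls.length le_rfl (j + 1) hj1]; push_cast; omega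
    exact ⟨ht, by omega, by push_cast; omega, hx⟩

theorem pv_lastCode_none_below (ls : List (List Char)) (x y : Int) (t : Nat)
    (h : (t : Int) ≤ pvLastB ls y ls.length + 1) (ht : t ≤ ls.length) :
    pvLastCode ls x y t = none := by
  induction t with
  | zero => rfl
  | succ u ih =>
    unfold pvLastCode
    rw [if_neg]
    · exact ih (by push_cast at h ⊢; omega) (by omega)
    · rintro ⟨-, hy, -, -⟩
      have hun : u < ls.length := by omega
      have h1 : (u : Int) ≤ pvLastB ls y ls.length := by push_cast at h; omega
      have h2 := (pv_lastB_le_iff ls y ls.length le_rfl u hun).2 h1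
      omega

theorem pv_lastCode_descend (ls : List (List Char)) (x y : Int) (e t : Nat)
    (hq : ∀ u : Nat, e < u → u < ls.length →
      ¬ (pvTy ls u = 0 ∧ y < pvStartsAt ls u ∧ ((u : Int) + 1) < (ls.length : Int) ∧ pvStartsAt ls (u + 1) ≤ x))
    (h1 : e < t) (h2 : t ≤ ls.length) :
    pvLastCode ls x y t = pvLastCode ls x y (e + 1) := by
  induction t with
  | zero => omega
  | succ u ih =>
    rcases Nat.lt_or_ge e u with h | h
    · unfold pvLastCode
      rw [if_neg (hq u h (by omega))]
      exact ih h (by omega)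
    · have : u = e := by omega
      rw [this]

theorem pv_LC2 (ls : List (List Char)) (x y : Int) (e : Nat)
    (he : (e : Int) ≤ pvLastB ls x ls.length - 1)
    (hce : pvLastB ls y ls.length < (e : Int)) (hen : e < ls.length) :
    pvLastCode ls x y (e + 1) = pvLCI ls (pvLastB ls y ls.length) e := by
  induction e with
  | zero =>
    have hbq := pv_bridgeQ ls x y 0 hen
    have hc : pvLastB ls y ls.length = -1 := by have := pv_lastB_lb ls y ls.length; omega
    by_cases h0 : pvTy ls 0 = 0
    · have hQ := hbq.2 ⟨by omega, by omega, h0⟩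
      unfold pvLastCode pvLCI
      rw [if_pos hQ, if_neg (by rw [hc]; omega), if_pos h0]
    · have hQ : ¬ _ := fun q => h0 (hbq.1 q).2.2
      unfold pvLastCode pvLCI
      rw [if_neg hQ, if_neg (by rw [hc]; omega), if_neg h0]
      rfl
  | succ u ih =>
    have hbq := pv_bridgeQ ls x y (u + 1) hen
    by_cases h0 : pvTy ls (u + 1) = 0
    · have hQ := hbq.2 ⟨by push_cast at hce ⊢; omega, by push_cast at he ⊢; omega, h0⟩
      unfold pvLastCode pvLCI
      rw [if_pos hQ, if_neg (by push_cast; omega), if_pos h0]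
    · have hQ : ¬ _ := fun q => h0 (hbq.1 q).2.2
      unfold pvLastCode pvLCI
      rw [if_neg hQ, if_neg (by push_cast; omega), if_neg h0]
      rcases Int.lt_or_le (pvLastB ls y ls.length) (u : Int) with h | h
      · exact ih (by push_cast at he ⊢; omega) h (by omega)
      · have hcu : pvLastB ls y ls.length = (u : Int) := by push_cast at hce; omega
        rw [pv_lastCode_none_below ls x y (u + 1) (by omega) (by omega)]
        cases u with
        | zero =>
          unfold pvLCI
          rw [if_pos (by rw [hcu]; omega)]
        | succ v =>
          unfold pvLCI
          rw [if_pos (by rw [hcu]; push_cast; omega)]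

theorem pv_lastCode_eq_LCI (ls : List (List Char)) (x y : Int) (e : Nat)
    (he : (e : Int) = pvLastB ls x ls.length - 1) (hcur : pvLastB ls y ls.length < (e : Int)) :
    pvLastCode ls x y ls.length = pvLCI ls (pvLastB ls y ls.length) e := by
  have hub := pv_lastB_ub ls x ls.length
  have hen : e < ls.length := by omega
  rw [pv_lastCode_descend ls x y e ls.length ?hq (by omega) le_rfl]
  · exact pv_LC2 ls x y e (by omega) hcur hen
  case hq =>
    intro u hu hun hQ
    rw [pv_bridgeQ ls x y u hun] at hQ
    omega

theorem pv_walk (ls : List (List Char)) (c : Int) (e : Nat) (hc : -1 ≤ c) (hce : c ≤ (e : Int))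
    (he : e < ls.length) :
    pvWalkBack ((List.range ls.length).map (pvTy ls)) (PySem.List.pyRange e c (-1)) ((e : Int) + 1)
      = match pvLCI ls c e with
        | some j => (j : Int) + 1
        | none => c + 1 := by
  have hty : ∀ u : Nat, u < ls.length →
      PySem.List.pyGetD ((List.range ls.length).map (pvTy ls)) ((u : Nat) : Int) 0 = pvTy ls u := by
    intro u hu
    unfold PySem.List.pyGetD
    rw [PySem.List.pyGet?_natCast]
    simp [List.getElem?_map, List.getElem?_range hu]
  induction e with
  | zero =>
    push_cast
    have h00 := hty 0 he
    push_cast at h00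
    rcases Int.lt_or_le c 0 with h | h
    · have hc0 : c = -1 := by omega
      rw [pv_pyRange_neg_cons 0 c (by omega), pv_pyRange_neg_empty (0 - 1) c (by omega)]
      unfold pvWalkBack pvLCI
      rw [hc0, h00]
      by_cases h0 : pvTy ls 0 = 0
      · rw [if_pos h0, if_neg (by omega), if_pos h0]
        simp
      · rw [if_neg h0, if_neg (by omega), if_neg h0]
        unfold pvWalkBack
        norm_num
    · have hc0 : c = 0 := by omega
      rw [hc0, pv_pyRange_neg_empty 0 0 le_rfl]
      unfold pvWalkBack pvLCI
      rw [if_pos (by omega)]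
      simp
  | succ u ih =>
    push_cast
    have hty1 := hty (u + 1) he
    push_cast at hty1
    rcases Int.lt_or_le c ((u : Int) + 1) with h | h
    · rw [pv_pyRange_neg_cons ((u : Int) + 1) c (by omega)]
      unfold pvWalkBack
      rw [hty1]
      by_cases h0 : pvTy ls (u + 1) = 0
      · rw [if_pos h0]
        unfold pvLCI
        rw [if_neg (by push_cast; omega), if_pos h0]
        push_cast
        ring
      · rw [if_neg h0]
        unfold pvLCI
        rw [if_neg (by push_cast; omega), if_neg h0]
        have := ih (by omega) (by omega)
        rw [show ((u : Int) + 1 - 1) = (u : Int) by ring]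
        exact this
    · have hc0 : c = (u : Int) + 1 := by omega
      rw [hc0, pv_pyRange_neg_empty _ _ (by omega)]
      unfold pvWalkBack pvLCI
      rw [if_pos (by push_cast; omega)]

theorem pv_offsets_sorted (ls : List (List Char)) :
    List.Pairwise (· ≤ ·) (pvStartsFrom ls 0) := by
  rw [List.pairwise_iff_getElem]
  intro i j hi hj hij
  rw [pv_startsFrom_length] at hi hj
  have gi := pv_startsFrom_getElem? ls 0 i (by omega)
  have gj := pv_startsFrom_getElem? ls 0 j (by omega)
  rw [List.getElem?_eq_getElem (by rw [pv_startsFrom_length]; omega)] at gi gj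
  simp at gi gj
  rw [gi, gj]
  exact le_of_lt (pv_startsAt_mono ls i j hij (by omega))

theorem pv_bisect_eq (ls : List (List Char)) (x : Int) :
    (PySem.List.bisectRight (pvStartsFrom ls 0) x : Int) - 1 = pvLastB ls x ls.length := by
  obtain ⟨hle, hbelow, habove⟩ := PySem.List.bisectRight_spec (pvStartsFrom ls 0) x (pv_offsets_sorted ls)
  set r := PySem.List.bisectRight (pvStartsFrom ls 0) x with hr
  rw [pv_startsFrom_length] at hle
  have hget : ∀ (j : Nat) (hj : j < ls.length), (pvStartsFrom ls 0)[j]'(by rw [pv_startsFrom_length]; exact hj) = pvStartsAt ls j := by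
    intro j hj
    have := pv_startsFrom_getElem? ls 0 j hj
    rw [List.getElem?_eq_getElem (by rw [pv_startsFrom_length]; omega)] at this
    simpa using this
  have hlb := pv_lastB_lb ls x ls.length
  have hub := pv_lastB_ub ls x ls.length
  rcases Nat.eq_zero_or_pos r with h0 | hpos
  · rw [h0]
    norm_num
    by_contra hne
    have hge : 0 ≤ pvLastB ls x ls.length := by omega
    set j := (pvLastB ls x ls.length).toNat with hj
    have hjn : j < ls.length := by omega
    have h1 : pvStartsAt ls j ≤ x := by
      rw [pv_lastB_le_iff ls x ls.length le_rfl j hjn]; omega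
    have h2 := habove j (by rw [pv_startsFrom_length]; omega) (by omega)
    rw [hget j hjn] at h2
    omega
  · have hrn : r - 1 < ls.length := by omega
    have h1 := hbelow (r - 1) (by rw [pv_startsFrom_length]; omega) (by omega)
    rw [hget (r - 1) hrn] at h1
    have h2 : ((r : Int) - 1) ≤ pvLastB ls x ls.length := by
      have := (pv_lastB_le_iff ls x ls.length le_rfl (r - 1) hrn).1 h1
      push_cast [Nat.cast_sub (by omega : 1 ≤ r)] at this ⊢
      omega
    have h3 : pvLastB ls x ls.length < (r : Int) := by
      by_contra hlt
      push_neg at hlt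
      set j := (pvLastB ls x ls.length).toNat with hj
      have hjn : j < ls.length := by omega
      have hjr : r ≤ j := by omega
      have hsa : pvStartsAt ls j ≤ x := by
        rw [pv_lastB_le_iff ls x ls.length le_rfl j hjn]; omega
      have h4 := habove j (by rw [pv_startsFrom_length]; omega) hjr
      rw [hget j hjn] at h4
      omega
    omega

theorem pv_altStep_eq (x y nl : Int) (st : PvBState) (i : Int) (l : List Char) :
    pvAltStep x y nl st (i, l) =
      ⟨(pvClassifyOne st.in_block l).2,
       st.start + l.length + 1,
       (if st.start ≤ y then i else st.cur_i),
       (if st.start ≤ x then i else st.next_i),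
       (if st.start ≤ x then st.start else st.next_off),
       (if st.start ≤ y then st.start + l.length + 1 else st.cur_after),
       (if (pvClassifyOne st.in_block l).1 = 0 ∧ st.start > y ∧ i + 1 < nl ∧ st.start + l.length + 1 ≤ x
        then some (st.start + l.length + 1) else st.after_code)⟩ := by
  unfold pvAltStep pvClassifyOne
  simp only []
  split_ifs <;> simp_all

theorem pv_alt_fold_take (ls : List (List Char)) (x y : Int) (t : Nat) (ht : t ≤ ls.length) :
    ((PySem.List.enumerate ls).take t).foldl (pvAltStep x y (PySem.List.len ls)) ⟨false, 0, -1, -1, 0, 0, none⟩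
      = ⟨pvCB ls t, pvStartsAt ls t, pvLastB ls y t, pvLastB ls x t,
          pvNextOff ls x t, pvCurAfter ls y t,
          (pvLastCode ls x y t).map (fun j => pvStartsAt ls (j + 1))⟩ := by
  induction t with
  | zero => rfl
  | succ u ih =>
    have hu : u < ls.length := by omega
    have hte : (PySem.List.enumerate ls).take (u + 1)
        = (PySem.List.enumerate ls).take u ++ [((u : Int), ls[u])] := by
      rw [List.take_add_one]
      congr 1
      rw [PySem.List.getElem?_enumerate]
      simp [List.getElem?_eq_getElem hu]
    rw [hte, List.foldl_append, ih (by omega)]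
    simp only [List.foldl_cons, List.foldl_nil]
    rw [pv_altStep_eq]
    have hgd : ls.getD u [] = ls[u] := List.getD_eq_getElem ls [] hu
    have hsucc := pv_startsAt_succ ls u hu
    simp only [PvBState.mk.injEq]
    refine ⟨?_, ?_, ?_, ?_, ?_, ?_, ?_⟩
    · rw [← hgd]; rfl
    · rw [hsucc, hgd]
    · rfl
    · rfl
    · rfl
    · show (if pvStartsAt ls u ≤ y then pvStartsAt ls u + (ls[u].length : Int) + 1 else pvCurAfter ls y u) = pvCurAfter ls y (u + 1)
      have hval : pvStartsAt ls u + (ls[u].length : Int) + 1 = pvStartsAt ls (u + 1) := by rw [hsucc, hgd]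
      have hCA : pvCurAfter ls y (u + 1) = if pvStartsAt ls u ≤ y then pvStartsAt ls (u + 1) else pvCurAfter ls y u := rfl
      rw [hCA, hval]
    · show (if (pvClassifyOne (pvCB ls u) ls[u]).1 = 0 ∧ pvStartsAt ls u > y ∧ (u : Int) + 1 < PySem.List.len ls ∧ pvStartsAt ls u + (ls[u].length : Int) + 1 ≤ x
            then some (pvStartsAt ls u + (ls[u].length : Int) + 1) else Option.map (fun j => pvStartsAt ls (j + 1)) (pvLastCode ls x y u))
        = Option.map (fun j => pvStartsAt ls (j + 1)) (pvLastCode ls x y (u + 1))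
      have hval : pvStartsAt ls u + (ls[u].length : Int) + 1 = pvStartsAt ls (u + 1) := by rw [hsucc, hgd]
      have hty' : (pvClassifyOne (pvCB ls u) ls[u]).1 = pvTy ls u := by rw [← hgd]; rfl
      have hLC : pvLastCode ls x y (u + 1)
          = if pvTy ls u = 0 ∧ y < pvStartsAt ls u ∧ ((u : Int) + 1) < (ls.length : Int) ∧ pvStartsAt ls (u + 1) ≤ x
            then some u else pvLastCode ls x y u := rfl
      rw [hLC, PySem.List.len_eq, hval, hty']
      by_cases hcond : pvTy ls u = 0 ∧ y < pvStartsAt ls u ∧ ((u : Int) + 1) < (ls.length : Int) ∧ pvStartsAt ls (u + 1) ≤ x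
      · rw [if_pos ⟨hcond.1, hcond.2.1, hcond.2.2.1, hcond.2.2.2⟩, if_pos hcond]
        rfl
      · rw [if_neg (fun h => hcond ⟨h.1, h.2.1, h.2.2.1, h.2.2.2⟩), if_neg hcond]

theorem pv_alt_fold (ls : List (List Char)) (x y : Int) :
    (PySem.List.enumerate ls).foldl (pvAltStep x y (PySem.List.len ls)) ⟨false, 0, -1, -1, 0, 0, none⟩
      = ⟨pvCB ls ls.length, pvStartsAt ls ls.length, pvLastB ls y ls.length, pvLastB ls x ls.length,
          pvNextOff ls x ls.length, pvCurAfter ls y ls.length,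
          (pvLastCode ls x y ls.length).map (fun j => pvStartsAt ls (j + 1))⟩ := by
  have := pv_alt_fold_take ls x y ls.length le_rfl
  rwa [List.take_of_length_le (by rw [PySem.List.length_enumerate]) ] at this

theorem pv_nl_none (l : List Char) (p : Int) (h : '\n' ∉ l) : pvNlOffs l p = [] := by
  induction l generalizing p with
  | nil => rfl
  | cons c rest ih =>
    have hc : ¬ c = '\n' := fun hh => h (by simp [hh])
    simp only [pvNlOffs, if_neg hc]
    exact ih _ (fun hh => h (by simp [hh]))

theorem pv_nl_split (pre rest : List Char) (p : Int) (h : '\n' ∉ pre) :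
    pvNlOffs (pre ++ '\n' :: rest) p
      = (p + pre.length + 1) :: pvNlOffs rest (p + pre.length + 1) := by
  induction pre generalizing p with
  | nil => simp [pvNlOffs]
  | cons c pr ih =>
    have hc : ¬ c = '\n' := fun hh => h (by simp [hh])
    simp only [List.cons_append, pvNlOffs, if_neg hc]
    rw [ih (p + 1) (fun hh => h (by simp [hh]))]
    have : p + 1 + (pr.length : Int) + 1 = p + ((c :: pr).length : Int) + 1 := by
      simp; ring
    rw [this]

theorem pv_S_eq (cs : List Char) (p : Int) :
    pvStartsFrom (cs.splitOn '\n') p = p :: pvNlOffs cs p := by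
  induction cs generalizing p with
  | nil => rfl
  | cons c rest ih =>
    by_cases hc : c = '\n'
    · subst hc
      rw [pv_splitOn_nl rest]
      simp only [pvStartsFrom, pvNlOffs, if_pos rfl]
      rw [show p + ([] : List Char).length + 1 = p + 1 by simp]
      rw [ih (p + 1)]
      simp
    · rw [pv_splitOn_ne c hc rest]
      have hne := pv_splitOn_ne_nil rest
      cases h2 : rest.splitOn '\n' with
      | nil => exact absurd h2 hne
      | cons h0 tl =>
        have ihp := ih (p + 1)
        rw [h2] at ihp
        simp only [pvStartsFrom] at ihp ⊢
        simp only [List.headI, List.tail_cons]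
        have htl := (List.cons_eq_cons.mp ihp).2
        simp only [pvNlOffs, if_neg hc]
        rw [show p + ((c :: h0).length : Int) + 1 = p + 1 + (h0.length : Int) + 1 by simp; ring, htl]

theorem pv_singleton_prefix_drop (l : List Char) (i : Nat) (hi : i < l.length) (h : l[i] = '\n') :
    ['\n'] <+: l.drop i := by
  refine ⟨l.drop (i + 1), ?_⟩
  rw [List.singleton_append, List.drop_eq_getElem_cons hi, h]

theorem pv_offsGo (cs : List Char) (fuel : Nat) : ∀ (k : Nat) (acc : List Int), k ≤ cs.length →
    (cs.drop k).count '\n' < fuel →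
    pvBuildOffsetsGo cs fuel acc (PySem.Chars.findFrom cs ['\n'] (k : Int) none)
      = acc ++ pvNlOffs (cs.drop k) (k : Int) := by
  induction fuel with
  | zero => intro k acc _ h; omega
  | succ f ih =>
    intro k acc hk hcount
    rw [PySem.Chars.findFrom_natCast cs ['\n'] k hk]
    by_cases hr : PySem.Chars.find (cs.drop k) ['\n'] = -1
    · rw [if_pos hr]
      unfold pvBuildOffsetsGo
      rw [if_pos rfl]
      have hmem : '\n' ∉ cs.drop k := by
        intro hm
        obtain ⟨l1, l2, hl⟩ := List.append_of_mem hm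
        exact (PySem.Chars.find_eq_neg_one_iff _ _).1 hr ⟨l1, l2, by rw [hl]; simp⟩
      rw [pv_nl_none _ _ hmem]
      simp
    · rw [if_neg hr]
      have hge : 0 ≤ PySem.Chars.find (cs.drop k) ['\n'] := by
        have := PySem.Chars.neg_one_le_find (cs.drop k) ['\n']
        omega
      obtain ⟨hpre, hmin⟩ := PySem.Chars.find_spec hge
      set r := (PySem.Chars.find (cs.drop k) ['\n']).toNat with hrdef
      have hlen : (cs.drop k).length = cs.length - k := List.length_drop
      have hrlen : r < (cs.drop k).length := by
        by_contra hcon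
        push_neg at hcon
        rw [List.drop_eq_nil_of_le hcon] at hpre
        simp at hpre
      obtain ⟨s, hs⟩ := hpre
      rw [List.singleton_append] at hs
      have hdecomp : cs.drop k = (cs.drop k).take r ++ '\n' :: s := by
        conv_lhs => rw [← List.take_append_drop r (cs.drop k)]
        rw [← hs]
      have hprelen : ((cs.drop k).take r).length = r := by
        rw [List.length_take]
        omega
      have hprenl : '\n' ∉ (cs.drop k).take r := by
        intro hm
        obtain ⟨i, hilt, hig⟩ := List.mem_iff_getElem.mp hm
        rw [hprelen] at hilt
        have higet : (cs.drop k)[i]'(by omega) = '\n' := by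
          rw [List.getElem_take] at hig
          exact hig
        exact hmin i (by omega) (pv_singleton_prefix_drop _ i (by omega) higet)
      unfold pvBuildOffsetsGo
      rw [if_neg (by omega)]
      have hcast : (k : Int) + PySem.Chars.find (cs.drop k) ['\n'] + 1 = ((k + r + 1 : Nat) : Int) := by
        push_cast
        omega
      have hdrop2 : cs.drop (k + r + 1) = s := by
        have h1 : cs.drop (k + r + 1) = (cs.drop k).drop (r + 1) := by
          rw [List.drop_drop, ← Nat.add_assoc]
        rw [h1, hdecomp]
        rw [show r + 1 = ((cs.drop k).take r).length + 1 by rw [hprelen]]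
        rw [List.drop_append]
        simp
      have hcnt : (cs.drop (k + r + 1)).count '\n' < f := by
        have hcnteq : (cs.drop k).count '\n' = ((cs.drop k).take r).count '\n' + ('\n' :: s).count '\n' := by
          conv_lhs => rw [hdecomp]
          rw [List.count_append]
        rw [List.count_eq_zero.mpr hprenl] at hcnteq
        simp only [List.count_cons_self] at hcnteq
        rw [hdrop2]
        omega
      rw [hcast, ih (k + r + 1) (acc ++ [((k + r + 1 : Nat) : Int)]) (by omega) hcnt]
      rw [hdrop2]
      conv_rhs => rw [hdecomp]
      rw [pv_nl_split _ _ _ hprenl, hprelen]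
      have hc2 : (k : Int) + r + 1 = ((k + r + 1 : Nat) : Int) := by push_cast; ring
      rw [hc2]
      simp

theorem pv_offsets_eq (cs : List Char) :
    pvBuildLineOffsets cs = pvStartsFrom (cs.splitOn '\n') 0 := by
  unfold pvBuildLineOffsets
  have h := pv_offsGo cs (cs.length + 1) 0 [0] (by omega)
    (by rw [List.drop_zero]; have := List.count_le_length (l := cs) (a := '\n'); omega)
  simp only [Nat.cast_zero, List.drop_zero] at h
  rw [← PySem.Chars.findFrom_zero cs ['\n'], h, pv_S_eq cs 0]
  simp

theorem pv_startsAt_cons (l0 : List Char) (tl : List (List Char)) (t : Nat) :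
    pvStartsAt (l0 :: tl) (t + 1) = ((l0.length : Int) + 1) + pvStartsAt tl t := by
  simp [pvStartsAt, List.take_succ_cons]
  try ring

theorem pv_slice_shift {α : Type} (w v : List α) (a b : Int) (ha : 0 ≤ a) (hb : 0 ≤ b) :
    PySem.List.slice (w ++ v) (some ((w.length : Int) + a)) (some ((w.length : Int) + b))
      = PySem.List.slice v (some a) (some b) := by
  rw [PySem.List.slice_toNat _ (by omega) (by omega), PySem.List.slice_toNat _ ha hb]
  have h1 : ((w.length : Int) + a).toNat = w.length + a.toNat := by omega
  have h2 : ((w.length : Int) + b).toNat = w.length + b.toNat := by omega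
  rw [h1, h2, show w.length + b.toNat - (w.length + a.toNat) = b.toNat - a.toNat by omega]
  congr 1
  rw [List.drop_append, List.drop_eq_nil_of_le (by omega)]
  simp [show w.length + a.toNat - w.length = a.toNat by omega]

theorem pv_SL (ls : List (List Char)) (t : Nat) (ht : t < ls.length) :
    PySem.List.slice (['\n'].intercalate ls) (some (pvStartsAt ls t))
        (some (if (t : Int) + 1 < (ls.length : Int) then pvStartsAt ls (t + 1) - 1
               else ((['\n'].intercalate ls).length : Int)))
      = ls[t] := by
  induction t generalizing ls with
  | zero =>
    cases ls with
    | nil => simp at ht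
    | cons l0 tl =>
      cases tl with
      | nil =>
        rw [if_neg (by simp)]
        rw [pv_startsAt_zero]
        simp only [List.intercalate, List.intersperse_single, List.flatten, List.append_nil]
        rw [PySem.List.slice_zero_start, PySem.List.slice_to _ (by omega)]
        simp
      | cons l1 tl' =>
        rw [if_pos (by simp)]
        have hs1 : pvStartsAt (l0 :: l1 :: tl') 1 = (l0.length : Int) + 1 := by
          rw [pv_startsAt_cons, pv_startsAt_zero]; ring
        rw [hs1, pv_startsAt_zero]
        have hint : ['\n'].intercalate (l0 :: l1 :: tl') = l0 ++ '\n' :: ['\n'].intercalate (l1 :: tl') := by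
          simp [List.intercalate]
        rw [hint]
        rw [PySem.List.slice_zero_start, PySem.List.slice_to _ (by omega)]
        have : ((l0.length : Int) + 1 - 1).toNat = l0.length := by omega
        rw [this]
        simp [List.take_left]
  | succ u ihu =>
    cases ls with
    | nil => simp at ht
    | cons l0 tl =>
      have htl : u < tl.length := by simpa using ht
      have hint : ['\n'].intercalate (l0 :: tl) = (l0 ++ ['\n']) ++ ['\n'].intercalate tl := by
        cases tl with
        | nil => simp at htl
        | cons l1 tl' => simp [List.intercalate]
      have hw : ((l0 ++ ['\n']).length : Int) = (l0.length : Int) + 1 := by simp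
      have hsc : ∀ m : Nat, pvStartsAt (l0 :: tl) (m + 1) = ((l0 ++ ['\n']).length : Int) + pvStartsAt tl m := by
        intro m; rw [pv_startsAt_cons, hw]
      rw [hint]
      have hlen : ((((l0 ++ ['\n']) ++ ['\n'].intercalate tl).length : Int))
          = ((l0 ++ ['\n']).length : Int) + ((['\n'].intercalate tl).length : Int) := by
        push_cast
        simp
        ring
      by_cases hlast : ((u : Int) + 1) + 1 < ((l0 :: tl).length : Int)
      · rw [if_pos (by simp only [List.length_cons] at hlast ⊢; push_cast at hlast ⊢; omega)]
        rw [hsc u, hsc (u + 1)]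
        have : ((l0 ++ ['\n']).length : Int) + pvStartsAt tl (u + 1) - 1
            = ((l0 ++ ['\n']).length : Int) + (pvStartsAt tl (u + 1) - 1) := by ring
        rw [this, pv_slice_shift _ _ _ _ (pv_startsAt_nonneg tl u) ?hb]
        · have ihtl := ihu tl htl
          rw [if_pos (by simp only [List.length_cons] at hlast ⊢; push_cast at hlast ⊢; omega)] at ihtl
          rw [ihtl]
          simp
        case hb =>
          have h0 := pv_startsAt_nonneg tl u
          have := pv_startsAt_mono tl u (u + 1) (by omega) (by omega)
          omega
      · rw [if_neg (by simp only [List.length_cons] at hlast ⊢; push_cast at hlast ⊢; omega)]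
        rw [hsc u, hlen]
        rw [pv_slice_shift _ _ _ _ (pv_startsAt_nonneg tl u) (by positivity)]

        have ihtl := ihu tl htl
        rw [if_neg (by simp only [List.length_cons] at hlast ⊢; push_cast at hlast ⊢; omega)] at ihtl
        rw [ihtl]
        simp

theorem pv_take2 (s p : List Char) (hp : p.length = 2) :
    (PySem.List.slice s none (some 2) = p) ↔ PySem.Chars.startswith s p = true := by
  rw [PySem.Chars.startswith_iff, List.prefix_iff_eq_take,
    PySem.List.slice_to _ (by omega : (0:Int) ≤ 2), hp]
  exact ⟨fun h => h.symm, fun h => h.symm⟩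

theorem pv_take_set (l : List Int) (t : Nat) (v : Int) (ht : t < l.length) :
    (l.set t v).take (t + 1) = l.take t ++ [v] := by
  rw [List.take_add_one, List.getElem?_set_self (by omega)]
  congr 1
  rw [List.take_set, List.set_eq_of_length_le (by simp)]

theorem pv_take2_imp (s : List Char) (h : PySem.List.slice s none (some 2) = ['*', '/']) :
    PySem.List.pyGetD s 0 ' ' = '*' := by
  rw [PySem.List.slice_to _ (by omega : (0:Int) ≤ 2)] at h
  have hs : s = '*' :: '/' :: s.drop 2 := by
    conv_lhs => rw [← List.take_append_drop 2 s]
    rw [show ((2:Int).toNat) = 2 from rfl] at h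
    rw [h]
    rfl
  rw [hs]
  unfold PySem.List.pyGetD
  rw [PySem.List.pyGet?_zero_cons]
  rfl

theorem pv_classify_step_eq (ls : List (List Char)) (t : Nat) (ht : t < ls.length)
    (types : List Int) (b : Bool) :
    pvClassifyStep (['\n'].intercalate ls) (pvStartsFrom ls 0) ((ls.length : Int)) (types, b) ((t : Nat) : Int)
      = (if (pvClassifyOne b (ls.getD t [])).1 = 0 then types else types.set t (pvClassifyOne b (ls.getD t [])).1,
         (pvClassifyOne b (ls.getD t [])).2) := by
  have hgd : ls.getD t [] = ls[t] := List.getD_eq_getElem ls [] ht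
  unfold pvClassifyStep
  simp only [Int.toNat_natCast]
  rw [pv_pyGetD_offsets ls t ht]
  have hstop : (if ((t : Nat) : Int) + 1 < (ls.length : Int) then PySem.List.pyGetD (pvStartsFrom ls 0) (((t : Nat) : Int) + 1) 0 - 1 else PySem.List.len (['\n'].intercalate ls))
      = (if ((t : Nat) : Int) + 1 < (ls.length : Int) then pvStartsAt ls (t + 1) - 1 else (((['\n'].intercalate ls).length : Int))) := by
    by_cases h : ((t : Nat) : Int) + 1 < (ls.length : Int)
    · rw [if_pos h, if_pos h]
      congr 2
      rw [show ((t : Nat) : Int) + 1 = (((t + 1 : Nat) : Nat) : Int) by push_cast; ring]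
      exact pv_pyGetD_offsets ls (t + 1) (by exact_mod_cast h)
    · rw [if_neg h, if_neg h, PySem.List.len_eq]
  rw [hstop, pv_SL ls t ht]
  rw [hgd]
  unfold pvClassifyOne
  simp only []
  set s := PySem.Chars.strip ls[t] with hsd
  by_cases h1 : s.isEmpty
  · simp [h1]
  · simp only [if_neg h1]
    by_cases h2 : b
    · simp only [if_pos h2]
      split <;> simp [Int.toNat_natCast]
    · simp only [if_neg h2]
      rw [if_congr (pv_take2 s ['/', '/'] rfl) rfl rfl]
      by_cases h3 : PySem.Chars.startswith s ['/', '/'] = true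
      · simp [h3]
      · simp only [if_neg h3]
        rw [if_congr (pv_take2 s ['/', '*'] rfl) rfl rfl]
        by_cases h4 : PySem.Chars.startswith s ['/', '*'] = true
        · simp only [if_pos h4]
          split <;> simp [Int.toNat_natCast]
        · simp only [if_neg h4]
          have hor : (PySem.List.pyGetD s 0 ' ' = '*' ∨ PySem.List.slice s none (some 2) = ['*', '/'])
              ↔ PySem.List.pyGetD s 0 ' ' = '*' := by
            constructor
            · rintro (h | h)
              · exact h
              · exact pv_take2_imp s h
            · exact Or.inl
          rw [if_congr hor rfl rfl]
          by_cases h5 : PySem.List.pyGetD s 0 ' ' = '*'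
          · simp [h5]
          · simp [h5]

theorem pv_pyRange_one_empty (a b : Int) (h : b ≤ a) : PySem.List.pyRange a b 1 = [] := by
  rw [PySem.List.pyRange_of_pos a b (by omega)]
  rw [if_neg (by omega)]
  rfl

theorem pv_classify_go (ls : List (List Char)) (u : List Char) (hu : u = ['\n'].intercalate ls)
    (d : Nat) : ∀ (t : Nat), t + d = ls.length →
    ∀ (types : List Int), types.length = ls.length →
    (∀ j : Nat, t ≤ j → j < ls.length → types[j]? = some 0) →
    ((PySem.List.pyRange ((t : Nat) : Int) ((ls.length : Nat) : Int) 1).foldl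
        (pvClassifyStep u (pvStartsFrom ls 0) ((ls.length : Int))) (types, pvCB ls t)).1
      = types.take t ++ (List.range' t d).map (pvTy ls) := by
  subst hu
  induction d with
  | zero =>
    intro t htd types hlen _
    rw [pv_pyRange_one_empty _ _ (by omega)]
    simp only [List.foldl_nil, List.range'_zero, List.map_nil, List.append_nil]
    rw [List.take_of_length_le (by omega)]
  | succ d ih =>
    intro t htd types hlen hzero
    have ht : t < ls.length := by omega
    rw [PySem.List.pyRange_one_cons (by exact_mod_cast ht)]
    simp only [List.foldl_cons]
    rw [pv_classify_step_eq ls t ht types (pvCB ls t)]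
    have hcb : (pvClassifyOne (pvCB ls t) (ls.getD t [])).2 = pvCB ls (t + 1) := rfl
    have hty : (pvClassifyOne (pvCB ls t) (ls.getD t [])).1 = pvTy ls t := rfl
    rw [hcb, hty]
    have hcast : ((t : Nat) : Int) + 1 = (((t + 1 : Nat) : Nat) : Int) := by push_cast; ring
    rw [hcast]
    by_cases hc : pvTy ls t = 0
    · rw [if_pos hc]
      rw [ih (t + 1) (by omega) types hlen (fun j hj hjn => hzero j (by omega) hjn)]
      rw [List.range'_succ, List.map_cons, List.take_add_one]
      rw [hzero t le_rfl ht]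
      simp [hc]
    · rw [if_neg hc]
      rw [ih (t + 1) (by omega) (types.set t (pvTy ls t)) (by simp [hlen])
        (fun j hj hjn => by rw [List.getElem?_set_ne (by omega)]; exact hzero j (by omega) hjn)]
      rw [pv_take_set types t _ (by omega)]
      rw [List.range'_succ, List.map_cons]
      simp

theorem pv_classify_eq (cs : List Char) :
    pvClassifyLines cs (pvBuildLineOffsets cs)
      = (List.range (cs.splitOn '\n').length).map (pvTy (cs.splitOn '\n')) := by
  rw [pv_offsets_eq]
  have hcs : ['\n'].intercalate (cs.splitOn '\n') = cs := List.intercalate_splitOn cs '\n'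
  have hlen : PySem.List.len (pvStartsFrom (cs.splitOn '\n') 0) = ((cs.splitOn '\n').length : Int) := by
    rw [PySem.List.len_eq, pv_startsFrom_length]
  show (List.foldl
      (pvClassifyStep cs (pvStartsFrom (cs.splitOn '\n') 0) (PySem.List.len (pvStartsFrom (cs.splitOn '\n') 0)))
      (List.replicate (PySem.List.len (pvStartsFrom (cs.splitOn '\n') 0)).toNat 0, false)
      (PySem.List.pyRange 0 (PySem.List.len (pvStartsFrom (cs.splitOn '\n') 0)) 1)).1
    = (List.range (cs.splitOn '\n').length).map (pvTy (cs.splitOn '\n'))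
  rw [hlen]
  have h := pv_classify_go (cs.splitOn '\n') cs hcs.symm (cs.splitOn '\n').length 0 (by omega)
    (List.replicate (((cs.splitOn '\n').length : Int)).toNat 0)
    (by simp)
    (fun j hj hjn => by rw [List.getElem?_replicate_of_lt (by simpa using hjn)])
  simp only [Nat.cast_zero] at h
  rw [show pvCB (cs.splitOn '\n') 0 = false from rfl] at h
  rw [h]
  simp [List.range_eq_range']

-- ---- assembly ----

theorem pv_LCI_le (ls : List (List Char)) (c : Int) (e : Nat) (j : Nat)
    (h : pvLCI ls c e = some j) : j ≤ e := by
  induction e with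
  | zero =>
    unfold pvLCI at h
    split at h
    · exact absurd h (by simp)
    · split at h
      · simp at h; omega
      · exact absurd h (by simp)
  | succ u ih =>
    unfold pvLCI at h
    split at h
    · exact absurd h (by simp)
    · split at h
      · simp at h; omega
      · have := ih h; omega

theorem pv_isIn_nl (s : String) : PySem.Str.isIn "\n" s = true ↔ '\n' ∈ s.toList := by
  rw [PySem.Str.isIn_iff_infix]
  constructor
  · intro h
    exact h.subset (by simp)
  · intro h
    obtain ⟨l1, l2, hl⟩ := List.append_of_mem h
    exact ⟨l1, l2, by rw [hl]; simp⟩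

theorem pv_core_eq (content : String) (x y : Int)
    (h : ¬ (x < 0 ∧ PySem.Str.isIn "\n" content = true)) :
    find_func_body_end_py content x y = find_func_body_end_py_alt content x y := by
  have hA : find_func_body_end_py content x y
      = PySem.List.pyGetD (pvBuildLineOffsets content.toList)
          (pvWalkBack (pvClassifyLines content.toList (pvBuildLineOffsets content.toList))
            (PySem.List.pyRange ((PySem.List.bisectRight (pvBuildLineOffsets content.toList) x : Int) - 1 - 1)
              ((PySem.List.bisectRight (pvBuildLineOffsets content.toList) y : Int) - 1) (-1))
            ((PySem.List.bisectRight (pvBuildLineOffsets content.toList) x : Int) - 1)) 0 := rfl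
  have hB : find_func_body_end_py_alt content x y
      = (let st := (PySem.List.enumerate (content.toList.splitOn '\n')).foldl
            (pvAltStep x y (PySem.List.len (content.toList.splitOn '\n')))
            ⟨false, 0, -1, -1, 0, 0, none⟩
         if st.next_i ≤ st.cur_i then st.next_off
         else match st.after_code with
           | some v => v
           | none => st.cur_after) := rfl
  set cs := content.toList with hcsdef
  set ls := cs.splitOn '\n' with hlsdef
  have hlsne : ls ≠ [] := pv_splitOn_ne_nil cs
  have hn1 : 1 ≤ ls.length := List.length_pos_iff.mpr hlsne
  rw [hB, pv_alt_fold ls x y]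
  rw [hA, pv_classify_eq, pv_offsets_eq, pv_bisect_eq, pv_bisect_eq]
  simp only []
  set next := pvLastB ls x ls.length with hnextdef
  set cur := pvLastB ls y ls.length with hcurdef
  have hnlb := pv_lastB_lb ls x ls.length
  have hnub := pv_lastB_ub ls x ls.length
  have hclb := pv_lastB_lb ls y ls.length
  have hcub := pv_lastB_ub ls y ls.length
  by_cases hle : next ≤ cur
  · -- next_i ≤ cur_i : B returns next_off; A's backward range is empty
    rw [if_pos hle]
    rw [pv_pyRange_neg_empty _ _ (by omega)]
    unfold pvWalkBack
    rw [pv_nextOff_eq]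
    by_cases hge : (0 : Int) ≤ next
    · rw [if_neg (by omega), show next = ((next.toNat : Nat) : Int) by omega,
        pv_pyGetD_offsets ls next.toNat (by omega)]
    · have hneg : next < 0 := by omega
      have hnm1 : next = -1 := by omega
      have hx : x < 0 := by
        by_contra hx0
        push_neg at hx0
        have h0 := (pv_lastB_le_iff ls x ls.length le_rfl 0 (by omega)).1
          (by rw [pv_startsAt_zero]; exact hx0)
        omega
      have hnonl : '\n' ∉ cs := by
        intro hm
        exact h ⟨hx, (pv_isIn_nl content).2 hm⟩
      have hsing : ls = [cs] := pv_splitOn_singleton cs hnonl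
      rw [if_pos hnm1, hnm1, pv_pyGetD_neg_one_offsets ls hlsne]
      rw [hsing]
      rfl
  · -- cur < next
    have hnext0 : 0 ≤ next := by omega
    have hgt : cur < next := by omega
    rw [if_neg (by omega)]
    by_cases heq : next ≤ cur + 1
    · -- next = cur + 1 : empty open range
      have hnc : next = cur + 1 := by omega
      rw [pv_lastCode_none_of_empty ls x y ls.length (by omega) le_rfl]
      simp only [Option.map_none]
      rw [pv_pyRange_neg_empty _ _ (by omega)]
      unfold pvWalkBack
      rw [pv_curAfter_eq]
      by_cases hcge : (0 : Int) ≤ cur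
      · rw [if_neg (by omega), show next = (((cur.toNat + 1 : Nat) : Nat) : Int) by omega,
          pv_pyGetD_offsets ls (cur.toNat + 1) (by omega)]
      · have hcm1 : cur = -1 := by omega
        rw [if_pos hcm1, show next = (((0 : Nat) : Nat) : Int) by omega,
          pv_pyGetD_offsets ls 0 (by omega), pv_startsAt_zero]
    · -- cur + 1 < next : walk the open range
      have hlt : cur + 1 < next := by omega
      set e : Nat := (next - 1).toNat with hedef
      have hee : (e : Int) = next - 1 := by omega
      have hen : e < ls.length := by omega
      have hwalk := pv_walk ls cur e (by omega) (by omega) hen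
      rw [show next - 1 = (e : Int) by omega, show next = (e : Int) + 1 by omega, hwalk]
      rw [pv_lastCode_eq_LCI ls x y e (by omega) (by omega)]
      cases hlci : pvLCI ls cur e with
      | none =>
        simp only [Option.map_none]
        rw [pv_curAfter_eq]
        by_cases hcge : (0 : Int) ≤ cur
        · rw [if_neg (by omega), show cur + 1 = (((cur.toNat + 1 : Nat) : Nat) : Int) by omega,
            pv_pyGetD_offsets ls (cur.toNat + 1) (by omega)]
        · have hcm1 : cur = -1 := by omega
          rw [if_pos hcm1, hcm1, show (-1 : Int) + 1 = (((0 : Nat) : Nat) : Int) by omega,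
            pv_pyGetD_offsets ls 0 (by omega), pv_startsAt_zero]
      | some j =>
        have hje := pv_LCI_le ls cur e j hlci
        simp only [Option.map_some]
        rw [show (j : Int) + 1 = (((j + 1 : Nat) : Nat) : Int) by push_cast; ring,
          pv_pyGetD_offsets ls (j + 1) (by omega)]

-- ===== VERDICT (by name: the statement is the Claim_ definition above) =====
theorem find_func_body_end_py_spec : Claim_unchanged_find_func_body_end_py := by
  intro content x y _ hND
  exact pv_core_eq content x y (by unfold D_find_func_body_end_py at hND; exact hND)
theorem find_func_body_end_py_changed : Claim_changed_find_func_body_end_py := by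
  unfold Claim_changed_find_func_body_end_py; decide
theorem find_func_body_end_py_tight : Claim_exact_find_func_body_end_py := by
  intro content x y _ hD
  unfold D_find_func_body_end_py at hD
  obtain ⟨hx, hnl⟩ := hD
  have hA : find_func_body_end_py content x y
      = PySem.List.pyGetD (pvBuildLineOffsets content.toList)
          (pvWalkBack (pvClassifyLines content.toList (pvBuildLineOffsets content.toList))
            (PySem.List.pyRange ((PySem.List.bisectRight (pvBuildLineOffsets content.toList) x : Int) - 1 - 1)
              ((PySem.List.bisectRight (pvBuildLineOffsets content.toList) y : Int) - 1) (-1))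
            ((PySem.List.bisectRight (pvBuildLineOffsets content.toList) x : Int) - 1)) 0 := rfl
  have hB : find_func_body_end_py_alt content x y
      = (let st := (PySem.List.enumerate (content.toList.splitOn '\n')).foldl
            (pvAltStep x y (PySem.List.len (content.toList.splitOn '\n')))
            ⟨false, 0, -1, -1, 0, 0, none⟩
         if st.next_i ≤ st.cur_i then st.next_off
         else match st.after_code with
           | some v => v
           | none => st.cur_after) := rfl
  set cs := content.toList with hcsdef
  set ls := cs.splitOn '\n' with hlsdef
  have hlsne : ls ≠ [] := pv_splitOn_ne_nil cs
  have hn2 : 2 ≤ ls.length := (pv_mem_iff_two_le cs).1 ((pv_isIn_nl content).1 hnl)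
  have hnegB := pv_lastB_neg ls x hx ls.length
  have hclb := pv_lastB_lb ls y ls.length
  rw [hB, pv_alt_fold ls x y]
  simp only []
  rw [if_pos (by rw [hnegB]; omega), pv_nextOff_eq, if_pos hnegB]
  rw [hA, pv_classify_eq, pv_offsets_eq, pv_bisect_eq, pv_bisect_eq]
  rw [← hlsdef, hnegB]
  rw [pv_pyRange_neg_empty _ _ (by omega)]
  unfold pvWalkBack
  rw [pv_pyGetD_neg_one_offsets ls hlsne]
  have := pv_startsAt_mono ls 0 (ls.length - 1) (by omega) (by omega)
  rw [pv_startsAt_zero] at this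
  omega
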